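-- pv_equiv track=rewrite | github.com/mshreeram/nslab | five-six-nine.py | key_gen
-- ===== SOURCE A (Python) =====
-- P_10_TABLE = [3, 5, 2, 7, 4, 10, 1, 9, 8, 6]
--
-- P_8_TABLE = [6, 3, 7, 4, 8, 5, 10, 9]
--
-- def key_gen(key):
--   initial_key = [key[i - 1] for i in P_10_TABLE]
--
--   left_half = initial_key[:5]
--   right_half = initial_key[5:]
--
--   # left circular shift
--   left_half = left_half[1:] + left_half[:1]
--   right_half = right_half[1:] + right_half[:1]
--
--   combined_key = left_half + right_half
--
--   subkey1 = [combined_key[i - 1] for i in P_8_TABLE]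
--
--   # left circular shift by 2
--   left_half = left_half[2:] + left_half[:2]
--   right_half = right_half[2:] + right_half[:2]
--
--   combined_key = left_half + right_half
--   subkey2 = [combined_key[i - 1] for i in P_8_TABLE]
--
--   return (subkey1, subkey2)
-- ===== SOURCE B (Python) =====
-- # Composed permutation tables: each output bit of subkey1/subkey2 traced back
-- # through P8, the shifts, the split and P10 to its 0-based source position in key.
-- SK1_TABLE = [0, 6, 8, 3, 7, 2, 9, 5]
-- SK2_TABLE = [7, 2, 5, 4, 9, 1, 8, 0]
--
-- def key_gen(key):
--   return ([key[i] for i in SK1_TABLE], [key[i] for i in SK2_TABLE])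
-- ===== Notes on version B (the rewrite author's own statement) =====
-- stated objective: simpler
-- what changed: The whole key schedule (P10, split, two rounds of circular shifts, recombination, two P8 applications) is collapsed into two precomputed composed index tables, so B is just two direct lookups into the original key with no intermediate halves or shifts.
import Mathlib
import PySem

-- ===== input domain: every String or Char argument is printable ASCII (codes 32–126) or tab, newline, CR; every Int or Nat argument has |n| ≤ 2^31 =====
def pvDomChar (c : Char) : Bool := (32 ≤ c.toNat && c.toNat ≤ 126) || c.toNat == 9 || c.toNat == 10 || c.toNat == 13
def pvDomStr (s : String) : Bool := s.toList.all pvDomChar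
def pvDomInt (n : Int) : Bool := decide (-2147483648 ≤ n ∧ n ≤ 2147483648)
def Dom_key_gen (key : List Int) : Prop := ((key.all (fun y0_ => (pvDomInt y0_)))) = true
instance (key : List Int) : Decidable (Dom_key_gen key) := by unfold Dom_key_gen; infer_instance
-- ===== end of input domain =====

-- B collapses the step-by-step S-DES key schedule into two precomputed composed
-- permutation tables; equivalence is claimed on keys long enough that A does not raise.

-- ===== PORT A =====
def P_10_TABLE : List Int := [3, 5, 2, 7, 4, 10, 1, 9, 8, 6]
def P_8_TABLE : List Int := [6, 3, 7, 4, 8, 5, 10, 9]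

def key_gen (key : List Int) : List Int × List Int :=
  let initial_key := P_10_TABLE.map (fun i => PySem.List.pyGetD key (i - 1) 0)
  let left_half := PySem.List.slice initial_key none (some 5)
  let right_half := PySem.List.slice initial_key (some 5) none
  -- left circular shift
  let left_half := PySem.List.slice left_half (some 1) none ++ PySem.List.slice left_half none (some 1)
  let right_half := PySem.List.slice right_half (some 1) none ++ PySem.List.slice right_half none (some 1)
  let combined_key := left_half ++ right_half
  let subkey1 := P_8_TABLE.map (fun i => PySem.List.pyGetD combined_key (i - 1) 0)
  -- left circular shift by 2
  let left_half := PySem.List.slice left_half (some 2) none ++ PySem.List.slice left_half none (some 2)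
  let right_half := PySem.List.slice right_half (some 2) none ++ PySem.List.slice right_half none (some 2)
  let combined_key := left_half ++ right_half
  let subkey2 := P_8_TABLE.map (fun i => PySem.List.pyGetD combined_key (i - 1) 0)
  (subkey1, subkey2)

-- ===== PORT B =====
def SK1_TABLE : List Int := [0, 6, 8, 3, 7, 2, 9, 5]
def SK2_TABLE : List Int := [7, 2, 5, 4, 9, 1, 8, 0]

def key_gen_alt (key : List Int) : List Int × List Int :=
  (SK1_TABLE.map (fun i => PySem.List.pyGetD key i 0),
   SK2_TABLE.map (fun i => PySem.List.pyGetD key i 0))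

-- ===== PRECONDITION & SPEC =====
-- Pre_ excludes keys of fewer than 10 elements, on which A raises IndexError.
def Pre_key_gen (key : List Int) : Prop := 10 ≤ key.length
instance (key : List Int) : Decidable (Pre_key_gen key) := by unfold Pre_key_gen; infer_instance
def pvWitness_key_gen : List Int := [1, 0, 1, 0, 0, 0, 0, 0, 1, 0]

def Spec_key_gen (key : List Int) (out : List Int × List Int) : Prop := out = key_gen_alt key
instance (key : List Int) (out : List Int × List Int) : Decidable (Spec_key_gen key out) := by unfold Spec_key_gen; infer_instance

-- ===== CLAIM (what is proved, stated in full; the proofs are below) =====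
def Claim_equal_key_gen : Prop := ∀ (key : List Int), Dom_key_gen key → Pre_key_gen key → Spec_key_gen key (key_gen key)

-- ===== LEMMAS AND PROOFS =====
theorem key_gen_cons (a b c d e f g h i j : Int) (t : List Int) :
    key_gen (a :: b :: c :: d :: e :: f :: g :: h :: i :: j :: t)
      = key_gen_alt (a :: b :: c :: d :: e :: f :: g :: h :: i :: j :: t) := by
  simp [key_gen, key_gen_alt, P_10_TABLE, P_8_TABLE, SK1_TABLE, SK2_TABLE,
        PySem.List.pyGetD, PySem.List.slice]

-- ===== VERDICT (by name: the statement is the Claim_ definition above) =====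
theorem key_gen_spec : Claim_equal_key_gen := by
  intro key _ hpre
  unfold Pre_key_gen at hpre
  match key with
  | a :: b :: c :: d :: e :: f :: g :: h :: i :: j :: t =>
    exact key_gen_cons a b c d e f g h i j t
  | [] | [_] | [_,_] | [_,_,_] | [_,_,_,_] | [_,_,_,_,_] | [_,_,_,_,_,_]
  | [_,_,_,_,_,_,_] | [_,_,_,_,_,_,_,_] | [_,_,_,_,_,_,_,_,_] =>
    simp at hpre
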